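-- pv_equiv track=rewrite | github.com/ShimonMalnick/Generative-Coreference-Resolution | src/utils.py | extract_clusters_from_text
-- ===== SOURCE A (Python) =====
-- def check_float(string):
--     try:
--         f = float(string)
--         return True
--     except Exception as e:
--         return False
--
-- def extract_clusters_from_text(text):
--     split_text = text.split()
--     clusters_memory = dict()
--     for idx, word in enumerate(split_text):
--         # found cluster mark
--         # if word.startswith("[") and word.endswith("]"):
--             # clusters = [cluster_idx for cluster_idx in word.strip(" ").strip("]").split(",") if check_float(cluster_idx)]
--         clusters = [cluster_idx for cluster_idx in word.split(",") if check_float(cluster_idx)]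
--         for cluster_idx in clusters:
--             if cluster_idx == "0":
--                 continue
--             elif cluster_idx not in clusters_memory:
--                 clusters_memory[cluster_idx] = []
--             clusters_memory[cluster_idx].append(idx)
--
--     clusters_memory = [(cluster_idx, token_indices) for cluster_idx, token_indices in clusters_memory.items()]
--     clusters_dict = dict()
--     for cluster_idx, token_indices in clusters_memory:
--         cluster = []
--         prev = None
--         start = None
--         for index, token_idx in enumerate(token_indices):
--             if index == (len(token_indices) - 1):
--                 if prev == (token_idx - 1):
--                     cluster.append((start, token_idx))
--                 else:
--                     if start is not None and prev is not None:
--                         cluster.append((start, prev))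
--                     cluster.append((token_idx, token_idx))
--             else:
--                 if prev is None:
--                     start = token_idx
--                     prev = token_idx
--
--                 elif prev == (token_idx - 1):
--                     prev = token_idx
--
--                 else:
--                     cluster.append((start, prev))
--                     start = token_idx
--                     prev = token_idx
--         try:
--             cluster_idx = int(cluster_idx if "." not in cluster_idx else cluster_idx.split(".")[0])
--             if cluster_idx not in clusters_dict:
--                 clusters_dict[cluster_idx] = cluster
--             else:
--                 clusters_dict[cluster_idx] += cluster
--         except Exception as e:
--             continue
--
--     clusters = [c[1] for c in sorted([(cluster_idx, cluster) for cluster_idx, cluster in clusters_dict.items()], key=lambda x: x[0])]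
--     return clusters
-- ===== SOURCE B (Python) =====
-- def check_float(string):
--     try:
--         f = float(string)
--         return True
--     except Exception as e:
--         return False
--
-- def extract_clusters_from_text(text):
--     # one fused pass: per cluster-string key keep (closed ranges, open start, open prev)
--     open_runs = {}
--     for idx, word in enumerate(text.split()):
--         for part in word.split(","):
--             if part == "0" or not check_float(part):
--                 continue
--             st = open_runs.get(part)
--             if st is None:
--                 open_runs[part] = [[], idx, idx]
--             elif idx == st[2] + 1:
--                 st[2] = idx
--             else:
--                 st[0].append((st[1], st[2]))
--                 st[1] = st[2] = idx
--     merged = {}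
--     for key, (ranges, start, prev) in open_runs.items():
--         ranges = ranges + [(start, prev)]
--         try:
--             k = int(key if "." not in key else key.split(".")[0])
--         except Exception:
--             continue
--         if k in merged:
--             merged[k] += ranges
--         else:
--             merged[k] = ranges
--     return [r for _, r in sorted(merged.items())]
-- ===== Notes on version B (the rewrite author's own statement) =====
-- stated objective: alternative
-- what changed: B fuses A's two phases (build per-key token-index lists in one dict, then a separate last-index-special-cased collapse loop per key) into a single pass that maintains, per cluster string, the closed ranges plus one open (start, prev) interval, closing it only once at the end of the scan.
import Mathlib
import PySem

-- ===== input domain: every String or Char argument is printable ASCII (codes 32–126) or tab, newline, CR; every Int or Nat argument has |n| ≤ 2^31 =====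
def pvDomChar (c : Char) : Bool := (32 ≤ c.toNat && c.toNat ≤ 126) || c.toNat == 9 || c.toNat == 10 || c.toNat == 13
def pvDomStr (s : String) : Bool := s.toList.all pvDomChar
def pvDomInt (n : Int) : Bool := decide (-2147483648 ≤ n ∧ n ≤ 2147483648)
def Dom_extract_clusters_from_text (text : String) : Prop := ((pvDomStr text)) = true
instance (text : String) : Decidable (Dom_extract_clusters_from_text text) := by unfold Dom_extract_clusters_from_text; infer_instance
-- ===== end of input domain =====

-- B fuses A's two phases (per-key index lists, then a separate collapse loop) into ONE pass that
-- keeps, per cluster string, the already-closed ranges plus the open (start, prev) interval.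

-- ===== PORT A =====

-- check_float: hand port of Python's float()-string grammar (exact on the ASCII domain; the
-- comma-split parts of whitespace-split words never contain whitespace, so no stripping is needed):
-- sign? (inf|infinity|nan (case-insensitive) | digits ['.' digits?] exp? | '.' digits exp?),
-- digits = [0-9](_?[0-9])*, exp = [eE] sign? digits.  Shared by both ports (it is a module helper
-- of A's file, and Source B defines the identical helper).
def pvDigitsTail : List Char → List Char
  | '_' :: d :: r => if PySem.Chars.isdigit d then pvDigitsTail r else '_' :: d :: r
  | d :: r => if PySem.Chars.isdigit d then pvDigitsTail r else d :: r
  | [] => []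

def pvDigits? : List Char → Option (List Char)
  | c :: r => if PySem.Chars.isdigit c then some (pvDigitsTail r) else none
  | [] => none

def pvExpOk : List Char → Bool
  | [] => true
  | c :: r =>
    if c = 'e' ∨ c = 'E' then
      let r2 : List Char := match r with
        | s :: r' => if s = '+' ∨ s = '-' then r' else s :: r'
        | [] => []
      match pvDigits? r2 with
      | some [] => true
      | _ => false
    else false

def check_float (s : String) : Bool :=
  let cs : List Char := match s.toList with
    | c :: r => if c = '+' ∨ c = '-' then r else c :: r
    | [] => []
  let low := cs.map PySem.Chars.lowerChar
  if low = "inf".toList ∨ low = "infinity".toList ∨ low = "nan".toList then true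
  else
    match pvDigits? cs with
    | some r =>
      let r' : List Char := match r with
        | '.' :: r1 => (match pvDigits? r1 with | some r2 => r2 | none => r1)
        | _ => r
      pvExpOk r'
    | none =>
      match cs with
      | '.' :: r1 => (match pvDigits? r1 with | some r2 => pvExpOk r2 | none => false)
      | _ => false

-- the inner collapse loop of A (state = (cluster, prev, start); Option = Python's None).
-- '.getD 0' ports a use of a variable Python knows is not None on that branch (see the invariants).
def pvCollapseStep (n : Int) (st : List (Int × Int) × Option Int × Option Int) (p : Int × Int) :
    List (Int × Int) × Option Int × Option Int :=
  let (cluster, prev, start) := st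
  let (index, t) := p
  if index = n - 1 then
    if prev = some (t - 1) then (cluster ++ [(start.getD 0, t)], prev, start)
    else
      let cluster := match start, prev with
        | some s, some pv => cluster ++ [(s, pv)]
        | _, _ => cluster
      (cluster ++ [(t, t)], prev, start)
  else
    if prev = none then (cluster, some t, some t)
    else if prev = some (t - 1) then (cluster, some t, start)
    else (cluster ++ [(start.getD 0, prev.getD 0)], some t, some t)

-- one word of A's first loop: filter the comma-split parts by check_float, then append idx per part
def pvMemStep (d : PySem.Dict String (List Int)) (iw : Int × String) :
    PySem.Dict String (List Int) :=
  let clusters := (((PySem.Str.split? iw.2 ",").getD [])).filter check_float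
  clusters.foldl (fun d ci =>
    if ci = "0" then d
    else
      let d := if d.contains ci then d else d.insert ci ([] : List Int)
      d.insert ci (d.getD ci [] ++ [iw.1])) d

-- cluster_idx = int(cluster_idx if "." not in cluster_idx else cluster_idx.split(".")[0]);
-- '.headI' ports [0] (split(".") is never empty); 'none' = the int() ValueError → continue
def pvIntKey? (ci : String) : Option Int :=
  PySem.Int.ofStr? (if ¬ PySem.Str.isIn "." ci then ci else ((PySem.Str.split? ci ".").getD []).headI)

def extract_clusters_from_text (text : String) : List (List (Int × Int)) :=
  let split_text := PySem.Str.split₀ text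
  let clusters_memory :=
    (PySem.List.enumerate split_text 0).foldl pvMemStep PySem.Dict.empty
  let clusters_dict :=
    clusters_memory.items.foldl (fun cd kt =>
      let cluster :=
        ((PySem.List.enumerate kt.2 0).foldl (pvCollapseStep (kt.2.length : Int))
          ([], none, none)).1
      match pvIntKey? kt.1 with
      | none => cd
      | some k =>
        if ¬ cd.contains k then cd.insert k cluster
        else cd.insert k (cd.getD k [] ++ cluster))
      (PySem.Dict.empty : PySem.Dict Int (List (Int × Int)))
  (PySem.List.sorted clusters_dict.items (fun x => x.1) false).map (·.2)

-- ===== PORT B =====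

-- one word of B's single pass: per valid non-"0" part, extend or close/reopen the open interval
def pvRunStep (d : PySem.Dict String (List (Int × Int) × Int × Int)) (iw : Int × String) :
    PySem.Dict String (List (Int × Int) × Int × Int) :=
  (((PySem.Str.split? iw.2 ",").getD [])).foldl (fun d part =>
    if part = "0" ∨ ¬ check_float part then d
    else
      match d.get? part with
      | none => d.insert part ([], iw.1, iw.1)
      | some st =>
        if iw.1 = st.2.2 + 1 then d.insert part (st.1, st.2.1, iw.1)
        else d.insert part (st.1 ++ [(st.2.1, st.2.2)], iw.1, iw.1)) d

def extract_clusters_from_text_alt (text : String) : List (List (Int × Int)) :=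
  let openRuns :=
    (PySem.List.enumerate (PySem.Str.split₀ text) 0).foldl pvRunStep PySem.Dict.empty
  let merged :=
    openRuns.items.foldl (fun md kst =>
      let ranges := kst.2.1 ++ [(kst.2.2.1, kst.2.2.2)]
      match pvIntKey? kst.1 with
      | none => md
      | some k =>
        if md.contains k then md.insert k (md.getD k [] ++ ranges)
        else md.insert k ranges)
      (PySem.Dict.empty : PySem.Dict Int (List (Int × Int)))
  (PySem.List.sorted merged.items (fun x => x.1) false).map (·.2)

-- ===== PRECONDITION & SPEC =====
def Spec_extract_clusters_from_text (text : String) (out : List (List (Int × Int))) : Prop := out = extract_clusters_from_text_alt text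
instance (text : String) (out : List (List (Int × Int))) : Decidable (Spec_extract_clusters_from_text text out) := by unfold Spec_extract_clusters_from_text; infer_instance

-- ===== CLAIM (what is proved, stated in full; the proofs are below) =====
def Claim_equal_extract_clusters_from_text : Prop := ∀ (text : String), Dom_extract_clusters_from_text text → Spec_extract_clusters_from_text text (extract_clusters_from_text text)

-- ===== LEMMAS AND PROOFS =====

-- B's per-index state update, abstracted from pvRunStep's some-branch
def pvUpd (st : List (Int × Int) × Int × Int) (i : Int) : List (Int × Int) × Int × Int :=
  if i = st.2.2 + 1 then (st.1, st.2.1, i) else (st.1 ++ [(st.2.1, st.2.2)], i, i)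

-- B's state for a key whose A-side index list is l (meaningful for l ≠ [])
def pvFoldB : List Int → List (Int × Int) × Int × Int
  | [] => ([], 0, 0)
  | x :: xs => xs.foldl pvUpd ([], x, x)

def pvG (kl : String × List Int) : String × (List (Int × Int) × Int × Int) :=
  (kl.1, pvFoldB kl.2)

theorem pvFoldB_concat (x : Int) (xs : List Int) (i : Int) :
    pvFoldB ((x :: xs) ++ [i]) = pvUpd (pvFoldB (x :: xs)) i := by
  simp [pvFoldB, List.foldl_append]

-- ---------- the collapse loop of A equals closing B's fused state ----------

-- the non-last branch of pvCollapseStep, as a function of the value alone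
def pvNL (st : List (Int × Int) × Option Int × Option Int) (t : Int) :
    List (Int × Int) × Option Int × Option Int :=
  if st.2.1 = none then (st.1, some t, some t)
  else if st.2.1 = some (t - 1) then (st.1, some t, st.2.2)
  else (st.1 ++ [(st.2.2.getD 0, st.2.1.getD 0)], some t, some t)

theorem pvStep_nonlast (n : Int) (st : List (Int × Int) × Option Int × Option Int)
    (i t : Int) (h : ¬ i = n - 1) : pvCollapseStep n st (i, t) = pvNL st t := by
  obtain ⟨c, prev, start⟩ := st
  simp [pvCollapseStep, pvNL, h]

theorem pvNL_corr (rs : List (Int × Int)) (s p y : Int) :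
    pvNL (rs, some p, some s) y =
      ((pvUpd (rs, s, p) y).1, some (pvUpd (rs, s, p) y).2.2, some (pvUpd (rs, s, p) y).2.1) := by
  by_cases hp : p = y - 1
  · subst hp
    simp [pvNL, pvUpd]
  · have h1 : ¬ (some p = some (y - 1)) := by simpa using hp
    have h2 : ¬ (y = p + 1) := by omega
    simp [pvNL, pvUpd, h1, h2]

theorem pvSim (ys : List Int) (rs : List (Int × Int)) (s p : Int) :
    ys.foldl pvNL (rs, some p, some s) =
      ((ys.foldl pvUpd (rs, s, p)).1, some (ys.foldl pvUpd (rs, s, p)).2.2,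
        some (ys.foldl pvUpd (rs, s, p)).2.1) := by
  induction ys generalizing rs s p with
  | nil => rfl
  | cons y ys ih =>
    simp only [List.foldl_cons, pvNL_corr]
    exact ih (pvUpd (rs, s, p) y).1 (pvUpd (rs, s, p) y).2.1 (pvUpd (rs, s, p) y).2.2

theorem pvStep_last (n i t : Int) (rs : List (Int × Int)) (s p : Int) (h : i = n - 1) :
    (pvCollapseStep n (rs, some p, some s) (i, t)).1 =
      (pvUpd (rs, s, p) t).1 ++ [((pvUpd (rs, s, p) t).2.1, (pvUpd (rs, s, p) t).2.2)] := by
  subst h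
  by_cases hp : p = t - 1
  · subst hp
    simp [pvCollapseStep, pvUpd]
  · have h1 : ¬ (some p = some (t - 1)) := by simpa using hp
    have h2 : ¬ (t = p + 1) := by omega
    simp [pvCollapseStep, pvUpd, h1, h2]

-- collapse of a nonempty index list = close the fused state
theorem pvCollapse_eq (l : List Int) (h : l ≠ []) :
    ((PySem.List.enumerate l 0).foldl (pvCollapseStep (l.length : Int)) ([], none, none)).1 =
      (pvFoldB l).1 ++ [((pvFoldB l).2.1, (pvFoldB l).2.2)] := by
  obtain ⟨x, xs, rfl⟩ := List.exists_cons_of_ne_nil h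
  rcases xs.eq_nil_or_concat with rfl | ⟨ys, t, rfl⟩
  · simp [PySem.List.enumerate_cons, PySem.List.enumerate_nil, pvCollapseStep, pvFoldB]
  · rw [List.concat_eq_append]
    have hn : ((x :: (ys ++ [t])).length : Int) = (ys.length : Int) + 2 := by
      simp; omega
    have he : PySem.List.enumerate (x :: (ys ++ [t])) 0 =
        ((0, x) :: PySem.List.enumerate ys 1) ++ [(1 + (ys.length : Int), t)] := by
      rw [PySem.List.enumerate_cons, PySem.List.enumerate_append]
      simp [PySem.List.enumerate_cons, PySem.List.enumerate_nil]
    rw [he, List.foldl_append]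
    have hfront : ((0, x) :: PySem.List.enumerate ys 1).foldl
        (pvCollapseStep ((x :: (ys ++ [t])).length : Int)) ([], none, none) =
        ((0, x) :: PySem.List.enumerate ys 1).foldl (fun st q => pvNL st q.2) ([], none, none) := by
      apply PySem.List.foldl_congr_mem
      intro acc q hq
      have hq1 : q.1 ≠ ((x :: (ys ++ [t])).length : Int) - 1 := by
        rw [hn]
        rcases List.mem_cons.mp hq with rfl | hq2
        · simp; omega
        · obtain ⟨k, hk, rfl⟩ := (PySem.List.mem_enumerate_iff _ _ _).mp hq2
          simp; omega
      calc pvCollapseStep _ acc q = pvCollapseStep _ acc (q.1, q.2) := rfl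
        _ = pvNL acc q.2 := pvStep_nonlast _ _ _ _ hq1
    rw [hfront, ← List.foldl_map (f := fun q : Int × Int => q.2) (g := pvNL)]
    have hmap : ((0, x) :: PySem.List.enumerate ys 1).map (fun q => q.2) = x :: ys := by
      simp [PySem.List.map_snd_enumerate]
    rw [hmap]
    simp only [List.foldl_cons, List.foldl_nil]
    have hfirst : pvNL ([], none, none) x = ([], some x, some x) := by simp [pvNL]
    rw [hfirst, pvSim]
    have hlast : (1 : Int) + (ys.length : Int) = ((x :: (ys ++ [t])).length : Int) - 1 := by
      rw [hn]; omega
    rw [pvStep_last _ _ t _ _ _ hlast]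
    have hsplit : x :: (ys ++ [t]) = (x :: ys) ++ [t] := by simp
    rw [hsplit, pvFoldB_concat]
    simp [pvFoldB]


-- ---------- simulation of the two first-pass dictionaries ----------

-- A's per-comma-part step, with the clusters filter fused in (see pvMemStep_eq)
def pvBodyA (i : Int) (d : PySem.Dict String (List Int)) (ci : String) :
    PySem.Dict String (List Int) :=
  if check_float ci then
    if ci = "0" then d
    else
      let d' := if d.contains ci then d else d.insert ci ([] : List Int)
      d'.insert ci (d'.getD ci [] ++ [i])
  else d

-- B's per-comma-part step
def pvBodyB (i : Int) (d : PySem.Dict String (List (Int × Int) × Int × Int)) (part : String) :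
    PySem.Dict String (List (Int × Int) × Int × Int) :=
  if part = "0" ∨ ¬ check_float part then d
  else
    match d.get? part with
    | none => d.insert part ([], i, i)
    | some st =>
      if i = st.2.2 + 1 then d.insert part (st.1, st.2.1, i)
      else d.insert part (st.1 ++ [(st.2.1, st.2.2)], i, i)

theorem pvMemStep_eq (d : PySem.Dict String (List Int)) (iw : Int × String) :
    pvMemStep d iw = ((PySem.Str.split? iw.2 ",").getD []).foldl (pvBodyA iw.1) d := by
  simp only [pvMemStep]
  rw [List.foldl_filter]
  rfl

theorem pvRunStep_eq (d : PySem.Dict String (List (Int × Int) × Int × Int)) (iw : Int × String) :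
    pvRunStep d iw = ((PySem.Str.split? iw.2 ",").getD []).foldl (pvBodyB iw.1) d := rfl

-- the invariant tying A's index-list dict to B's fused-state dict
def pvInv (dA : PySem.Dict String (List Int))
    (dB : PySem.Dict String (List (Int × Int) × Int × Int)) : Prop :=
  dB.items = dA.items.map pvG ∧ dA.keys.Nodup ∧ ∀ p ∈ dA.items, p.2 ≠ []

theorem pvInv_keys {dA : PySem.Dict String (List Int)}
    {dB : PySem.Dict String (List (Int × Int) × Int × Int)} (h : pvInv dA dB) :
    dB.keys = dA.keys := by
  simp only [PySem.Dict.keys, h.1, List.map_map]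
  rfl

theorem pvInv_contains {dA : PySem.Dict String (List Int)}
    {dB : PySem.Dict String (List (Int × Int) × Int × Int)} (h : pvInv dA dB) (k : String) :
    dB.contains k = dA.contains k := by
  rw [PySem.Dict.contains_eq_decide_mem_keys, PySem.Dict.contains_eq_decide_mem_keys,
    pvInv_keys h]

theorem pvInv_insert (dA : PySem.Dict String (List Int))
    (dB : PySem.Dict String (List (Int × Int) × Int × Int)) (h : pvInv dA dB)
    (k : String) (v : List Int) (hv : v ≠ []) :
    pvInv (dA.insert k v) (dB.insert k (pvFoldB v)) := by
  obtain ⟨hI, hN, hne⟩ := h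
  refine ⟨?_, PySem.Dict.nodup_keys_insert dA k v hN, ?_⟩
  · by_cases hc : dA.contains k = true
    · have hcb : dB.contains k = true := by rw [pvInv_contains ⟨hI, hN, hne⟩]; exact hc
      rw [PySem.Dict.items_insert_of_contains dA v hc,
        PySem.Dict.items_insert_of_contains dB _ hcb, hI, List.map_map, List.map_map]
      apply List.map_congr_left
      intro p hp
      by_cases hpk : p.1 = k
      · simp [Function.comp, pvG, hpk]
      · simp [Function.comp, pvG, hpk]
    · have hcb : dB.contains k = false := by rw [pvInv_contains ⟨hI, hN, hne⟩]; simpa using hc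
      rw [PySem.Dict.items_insert_of_not_contains dA v (by simpa using hc),
        PySem.Dict.items_insert_of_not_contains dB _ hcb, hI, List.map_append]
      rfl
  · intro p hp
    rcases (PySem.Dict.mem_items_insert dA k v p).mp hp with rfl | ⟨hp', -⟩
    · exact hv
    · exact hne _ hp'

theorem pvStep_inv (i : Int) (part : String) (dA : PySem.Dict String (List Int))
    (dB : PySem.Dict String (List (Int × Int) × Int × Int)) (h : pvInv dA dB) :
    pvInv (pvBodyA i dA part) (pvBodyB i dB part) := by
  by_cases hf : check_float part = true
  · by_cases h0 : part = "0"
    · simpa [pvBodyA, pvBodyB, hf, h0] using h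
    · have hcond : ¬ (part = "0" ∨ ¬ check_float part = true) := by simp [h0, hf]
      simp only [pvBodyA, pvBodyB, if_pos hf, if_neg h0, if_neg hcond]
      by_cases hc : dA.contains part = true
      · obtain ⟨lA, hga⟩ : ∃ lA, dA.get? part = some lA := by
          cases hga' : dA.get? part with
          | none =>
            exact absurd ((PySem.Dict.get?_eq_none_iff_contains dA part).mp hga')
              (by simp [hc])
          | some v => exact ⟨v, rfl⟩
        have hmemA := PySem.Dict.mem_items_of_get?_eq_some dA hga
        have hlne : lA ≠ [] := h.2.2 _ hmemA
        obtain ⟨x, xs, rfl⟩ := List.exists_cons_of_ne_nil hlne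
        have hNb : dB.keys.Nodup := by rw [pvInv_keys h]; exact h.2.1
        have hgb : dB.get? part = some (pvFoldB (x :: xs)) := by
          apply PySem.Dict.get?_of_mem_items dB _ hNb
          rw [h.1]
          exact List.mem_map_of_mem hmemA
        have hgetD : dA.getD part [] = x :: xs := by
          rw [PySem.Dict.getD_eq_get?_getD, hga]; rfl
        rw [if_pos hc, hgb, hgetD]
        have hB : (if i = (pvFoldB (x :: xs)).2.2 + 1
              then dB.insert part ((pvFoldB (x :: xs)).1, (pvFoldB (x :: xs)).2.1, i)
              else dB.insert part
                ((pvFoldB (x :: xs)).1 ++ [((pvFoldB (x :: xs)).2.1, (pvFoldB (x :: xs)).2.2)],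
                  i, i))
            = dB.insert part (pvFoldB ((x :: xs) ++ [i])) := by
          rw [pvFoldB_concat]
          unfold pvUpd
          split_ifs <;> rfl
        show pvInv (dA.insert part ((x :: xs) ++ [i]))
          (if i = (pvFoldB (x :: xs)).2.2 + 1
            then dB.insert part ((pvFoldB (x :: xs)).1, (pvFoldB (x :: xs)).2.1, i)
            else dB.insert part
              ((pvFoldB (x :: xs)).1 ++ [((pvFoldB (x :: xs)).2.1, (pvFoldB (x :: xs)).2.2)],
                i, i))
        rw [hB]
        exact pvInv_insert dA dB h part _ (by simp)
      · have hcb : dB.contains part = false := by rw [pvInv_contains h]; simpa using hc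
        have hgb : dB.get? part = none := (PySem.Dict.get?_eq_none_iff_contains dB part).mpr hcb
        rw [if_neg hc, hgb, PySem.Dict.getD_insert_self, PySem.Dict.insert_insert_self]
        have h1 : ([] : List Int) ++ [i] = [i] := by simp
        rw [h1]
        exact pvInv_insert dA dB h part [i] (by simp)
  · have hcond : (part = "0" ∨ ¬ check_float part = true) := Or.inr hf
    simpa [pvBodyA, pvBodyB, hf, hcond] using h

theorem pvFold_inv (parts : List String) (i : Int) (dA : PySem.Dict String (List Int))
    (dB : PySem.Dict String (List (Int × Int) × Int × Int)) (h : pvInv dA dB) :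
    pvInv (parts.foldl (pvBodyA i) dA) (parts.foldl (pvBodyB i) dB) := by
  induction parts generalizing dA dB with
  | nil => exact h
  | cons c cs ih => exact ih _ _ (pvStep_inv i c dA dB h)

theorem pvInv_empty : pvInv PySem.Dict.empty PySem.Dict.empty :=
  ⟨rfl, PySem.Dict.nodup_keys_empty, fun _ hp => nomatch hp⟩

theorem pvStream_inv (L : List (Int × String)) (dA : PySem.Dict String (List Int))
    (dB : PySem.Dict String (List (Int × Int) × Int × Int)) (h : pvInv dA dB) :
    pvInv (L.foldl pvMemStep dA) (L.foldl pvRunStep dB) := by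
  induction L generalizing dA dB with
  | nil => exact h
  | cons iw L ih =>
    simp only [List.foldl_cons, pvMemStep_eq, pvRunStep_eq]
    exact ih _ _ (pvFold_inv _ _ _ _ h)

-- ===== VERDICT (by name: the statement is the Claim_ definition above) =====
theorem extract_clusters_from_text_spec : Claim_equal_extract_clusters_from_text := by
  intro text _
  unfold Spec_extract_clusters_from_text
  simp only [extract_clusters_from_text, extract_clusters_from_text_alt]
  have hinv := pvStream_inv (PySem.List.enumerate (PySem.Str.split₀ text) 0) _ _ pvInv_empty
  rw [hinv.1, List.foldl_map]
  congr 1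
  congr 1
  congr 1
  apply PySem.List.foldl_congr_mem
  intro md kt hkt
  have hne := hinv.2.2 kt hkt
  rw [pvCollapse_eq kt.2 hne]
  simp only [pvG]
  cases hik : pvIntKey? kt.1 with
  | none => rfl
  | some k => by_cases hck : md.contains k = true <;> simp [hck]
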